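-- pv_equiv track=rewrite | github.com/pypi-data/pypi-mirror-300 | packages/imei-lookup/imei_lookup-0.1.0.tar.gz/imei_lookup-0.1.0/imei_lookup/main.py | sort_iphone_models
-- ===== SOURCE A (Python) =====
-- def sort_iphone_models(device_count):
--     iphones = []
--     ipads = []
--     other_devices = []
--
--     for device in device_count.keys():
--         if "iPhone" in device:
--             iphones.append(device)
--         elif "iPad" in device:
--             ipads.append(device)
--         else:
--             other_devices.append(device)
--
--     iphones_sorted = sorted(iphones, key=lambda d: (int(''.join(filter(str.isdigit, d.split()[1]))) if any(char.isdigit() for char in d.split()[1]) else 1000, d.lower()))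
--     ipads_sorted = sorted(ipads, key=lambda d: (int(''.join(filter(str.isdigit, d.split()[1]))) if any(char.isdigit() for char in d.split()[1]) else 1000, d.lower()))
--
--     return iphones_sorted + ipads_sorted + sorted(other_devices)
-- ===== SOURCE B (Python) =====
-- def sort_iphone_models(device_count):
--     def model_num(d):
--         tok = d.split()[1]
--         digits = ''.join(ch for ch in tok if ch.isdigit())
--         return int(digits) if digits else 1000
--
--     def key(d):
--         if "iPhone" in d:
--             return (0, model_num(d), d.lower())
--         if "iPad" in d:
--             return (1, model_num(d), d.lower())
--         return (2, 0, d)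
--
--     return sorted(device_count, key=key)
-- ===== Notes on version B (the rewrite author's own statement) =====
-- stated objective: idiomatic
-- what changed: A's three-way partition loop followed by three separate sorts and a concatenation is replaced by a single stable sorted() over the device names with one composite (group, model-number, tie-break) key, whose group index 0/1/2 reproduces the iPhones-iPads-others concatenation order.
import Mathlib
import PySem

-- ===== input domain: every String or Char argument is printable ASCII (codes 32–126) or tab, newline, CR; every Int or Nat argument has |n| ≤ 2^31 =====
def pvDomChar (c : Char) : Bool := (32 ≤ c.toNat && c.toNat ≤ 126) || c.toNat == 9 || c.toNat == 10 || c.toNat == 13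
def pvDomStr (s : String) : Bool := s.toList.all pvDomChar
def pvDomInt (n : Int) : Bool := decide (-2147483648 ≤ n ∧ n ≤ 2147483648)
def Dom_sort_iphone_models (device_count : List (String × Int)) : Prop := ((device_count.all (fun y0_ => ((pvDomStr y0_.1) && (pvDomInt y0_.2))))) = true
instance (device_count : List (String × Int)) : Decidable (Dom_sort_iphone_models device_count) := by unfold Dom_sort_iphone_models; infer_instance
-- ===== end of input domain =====

-- B replaces A's three-way partition plus three separate sorts by ONE stable sort of the keys
-- under a composite (group, model-number, tie-break) key; same return value, different decomposition.

-- ===== PORT A =====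
-- A's lambda key component 'int(''.join(filter(str.isdigit, d.split()[1]))) if any(char.isdigit() for char in d.split()[1]) else 1000'.
-- d.split()[1] is ported via pyGet?/getD; Pre_ guarantees the index is in range wherever Python evaluates it.
def pyModelNumA (d : String) : Int :=
  let tok := (PySem.List.pyGet? (PySem.Str.split₀ d) 1).getD ""
  if tok.toList.any PySem.Chars.isdigit then
    (PySem.Int.ofChars? (tok.toList.filter PySem.Chars.isdigit)).getD 0
  else 1000

def sort_iphone_models (device_count : List (String × Int)) : List String :=
  -- for device in device_count.keys(): append to iphones / ipads / other_devices
  let p := (PySem.Dict.ofList device_count).keys.foldl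
    (fun (acc : List String × List String × List String) d =>
      if PySem.Str.isIn "iPhone" d then (acc.1 ++ [d], acc.2.1, acc.2.2)
      else if PySem.Str.isIn "iPad" d then (acc.1, acc.2.1 ++ [d], acc.2.2)
      else (acc.1, acc.2.1, acc.2.2 ++ [d]))
    ([], [], [])
  PySem.List.sorted2 p.1 pyModelNumA PySem.Str.lower
    ++ PySem.List.sorted2 p.2.1 pyModelNumA PySem.Str.lower
    ++ PySem.List.sorted p.2.2 (fun d => d) false

-- ===== PORT B =====
def pyModelNumB (d : String) : Int :=
  let tok := (PySem.List.pyGet? (PySem.Str.split₀ d) 1).getD ""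
  let ds := tok.toList.filter PySem.Chars.isdigit
  if ds.isEmpty then 1000 else (PySem.Int.ofChars? ds).getD 0

def pyKeyB (d : String) : Int × Int × String :=
  if PySem.Str.isIn "iPhone" d then (0, pyModelNumB d, PySem.Str.lower d)
  else if PySem.Str.isIn "iPad" d then (1, pyModelNumB d, PySem.Str.lower d)
  else (2, 0, d)

-- Python's '<' on the 3-tuple keys, written out (PySem covers tuple keys up to sorted2;
-- this is the same hand-rolled lexicographic Bool comparison sorted2 itself uses, one level deeper).
def pyLt3 (a b : Int × Int × String) : Bool :=
  decide (a.1 < b.1) || (a.1 == b.1 && (decide (a.2.1 < b.2.1) || (a.2.1 == b.2.1 && decide (a.2.2 < b.2.2))))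

-- sorted(device_count, key=key): PySem.List.sorted's stable insertion, with the tuple comparator above.
def sort_iphone_models_alt (device_count : List (String × Int)) : List String :=
  (PySem.Dict.ofList device_count).keys.foldl
    (fun acc x => PySem.List.insertBy (fun a b => pyLt3 (pyKeyB a) (pyKeyB b)) x acc) []

-- ===== PRECONDITION & SPEC =====
-- Pre_ excludes exactly the inputs on which A raises IndexError: a key containing "iPhone" or "iPad"
-- but fewer than two whitespace-separated tokens (d.split()[1] fails); B raises there too.
def Pre_sort_iphone_models (device_count : List (String × Int)) : Prop :=
  ∀ p ∈ device_count, (PySem.Str.isIn "iPhone" p.1 || PySem.Str.isIn "iPad" p.1) = true →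
    2 ≤ (PySem.Str.split₀ p.1).length
instance (device_count : List (String × Int)) : Decidable (Pre_sort_iphone_models device_count) := by
  unfold Pre_sort_iphone_models; infer_instance

def pvWitness_sort_iphone_models : (List (String × Int)) :=
  [("iPhone 7", 1), ("iPad Air", 2), ("Galaxy", 3)]

def Spec_sort_iphone_models (device_count : List (String × Int)) (out : List String) : Prop := out = sort_iphone_models_alt device_count
instance (device_count : List (String × Int)) (out : List String) : Decidable (Spec_sort_iphone_models device_count out) := by unfold Spec_sort_iphone_models; infer_instance

-- ===== CLAIM (what is proved, stated in full; the proofs are below) =====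
def Claim_equal_sort_iphone_models : Prop := ∀ (device_count : List (String × Int)), Dom_sort_iphone_models device_count → Pre_sort_iphone_models device_count → Spec_sort_iphone_models device_count (sort_iphone_models device_count)

-- ===== LEMMAS AND PROOFS =====

-- the group index: first component of B's key
def pyGroup (d : String) : Int :=
  if PySem.Str.isIn "iPhone" d then 0 else if PySem.Str.isIn "iPad" d then 1 else 2

theorem pyKeyB_fst (d : String) : (pyKeyB d).1 = pyGroup d := by
  unfold pyKeyB pyGroup; split_ifs <;> rfl

theorem pyModelNumB_eq_A : pyModelNumB = pyModelNumA := by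
  funext d
  show (let tok := (PySem.List.pyGet? (PySem.Str.split₀ d) 1).getD "";
        let ds := tok.toList.filter PySem.Chars.isdigit;
        if ds.isEmpty then (1000:Int) else (PySem.Int.ofChars? ds).getD 0) = _
  simp only [pyModelNumA]
  generalize (PySem.List.pyGet? (PySem.Str.split₀ d) 1).getD "" = tok
  by_cases h : tok.toList.any PySem.Chars.isdigit
  · have : (tok.toList.filter PySem.Chars.isdigit).isEmpty = false := by
      rcases List.any_eq_true.1 h with ⟨x, hx, hpx⟩
      simp [List.isEmpty_eq_false_iff, List.filter_eq_nil_iff]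
      exact ⟨x, hx, hpx⟩
    simp [h, this]
  · have : (tok.toList.filter PySem.Chars.isdigit).isEmpty = true := by
      simp only [List.isEmpty_iff, List.filter_eq_nil_iff]
      intro a ha
      simp [List.any_eq_true] at h
      simp [h a ha]
    simp [h, this]

-- Bool-level: 'a == b && c' vs sorted2's '!(b < a) && c' under a leading 'a < b ||' (Int)
theorem lex_tail_eq (a b : Int) (c : Bool) :
    (decide (a < b) || (a == b && c)) = (decide (a < b) || (!decide (b < a) && c)) := by
  by_cases h : a < b
  · simp [h]
  · by_cases h2 : b < a
    · have hne : a ≠ b := by omega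
      simp [h, h2, hne]
    · have hab : a = b := by omega
      subst hab
      simp

-- insertBy into a concatenation, inserting only in the left part
theorem insertBy_append_left {α : Type} (bef : α → α → Bool) (x : α) (A B : List α)
    (h : ∀ y ∈ B, bef x y = true) :
    PySem.List.insertBy bef x (A ++ B) = PySem.List.insertBy bef x A ++ B := by
  induction A with
  | nil =>
    cases B with
    | nil => rfl
    | cons b B' => simp [PySem.List.insertBy, h b (by simp)]
  | cons a A' ih =>
    simp only [List.cons_append, PySem.List.insertBy]
    by_cases hxa : bef x a = true <;> simp [hxa, ih]

-- insertBy into a concatenation, inserting only in the right part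
theorem insertBy_append_right {α : Type} (bef : α → α → Bool) (x : α) (A B : List α)
    (h : ∀ y ∈ A, bef x y = false) :
    PySem.List.insertBy bef x (A ++ B) = A ++ PySem.List.insertBy bef x B := by
  induction A with
  | nil => rfl
  | cons a A' ih =>
    simp only [List.cons_append, PySem.List.insertBy, h a (by simp)]
    simp [ih (fun y hy => h y (by simp [hy]))]

theorem insertBy_congr {α : Type} (bef bef' : α → α → Bool) (x : α) (ys : List α)
    (h : ∀ y ∈ ys, bef x y = bef' x y) :
    PySem.List.insertBy bef x ys = PySem.List.insertBy bef' x ys := by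
  induction ys with
  | nil => rfl
  | cons y ys' ih =>
    simp only [PySem.List.insertBy, h y (by simp)]
    by_cases hy : bef' x y = true <;> simp [hy, ih (fun z hz => h z (by simp [hz]))]

-- congruence of the insertion fold under a predicate that all elements satisfy
theorem foldl_insertBy_congr {α : Type} (bef bef' : α → α → Bool) (P : α → Prop)
    (h : ∀ x y, P x → P y → bef x y = bef' x y) :
    ∀ (xs acc : List α), (∀ x ∈ xs, P x) → (∀ y ∈ acc, P y) →
    xs.foldl (fun acc x => PySem.List.insertBy bef x acc) acc
      = xs.foldl (fun acc x => PySem.List.insertBy bef' x acc) acc := by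
  intro xs
  induction xs with
  | nil => intro acc _ _; rfl
  | cons x xs' ih =>
    intro acc hxs hacc
    have hx : P x := hxs x (by simp)
    simp only [List.foldl_cons]
    rw [insertBy_congr bef bef' x acc (fun y hy => h x y hx (hacc y hy))]
    exact ih _ (fun z hz => hxs z (by simp [hz]))
      (fun y hy => by
        rcases (PySem.List.mem_insertBy _ _ _ _).1 hy with rfl | hy'
        · exact hx
        · exact hacc y hy')

-- a stable insertion sort whose comparator strictly separates three groups splits into the three group sorts
theorem stable_split3 {α : Type} (bef : α → α → Bool) (G : α → Int)
    (hG : ∀ x, G x = 0 ∨ G x = 1 ∨ G x = 2)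
    (htrue : ∀ x y, G x < G y → bef x y = true)
    (hfalse : ∀ x y, G y < G x → bef x y = false) :
    ∀ (xs a0 a1 a2 : List α),
      (∀ y ∈ a0, G y = 0) → (∀ y ∈ a1, G y = 1) → (∀ y ∈ a2, G y = 2) →
    xs.foldl (fun acc x => PySem.List.insertBy bef x acc) (a0 ++ a1 ++ a2)
      = (xs.filter (fun x => G x == 0)).foldl (fun acc x => PySem.List.insertBy bef x acc) a0
        ++ (xs.filter (fun x => G x == 1)).foldl (fun acc x => PySem.List.insertBy bef x acc) a1
        ++ (xs.filter (fun x => G x == 2)).foldl (fun acc x => PySem.List.insertBy bef x acc) a2 := by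
  intro xs
  induction xs with
  | nil => intro a0 a1 a2 _ _ _; simp
  | cons x xs' ih =>
    intro a0 a1 a2 h0 h1 h2
    rcases hG x with hx | hx | hx
    · have hfilt0 : (G x == 0) = true := by simp [hx]
      have hfilt1 : (G x == 1) = false := by simp [hx]
      have hfilt2 : (G x == 2) = false := by simp [hx]
      simp only [List.filter_cons, hfilt0, hfilt1, hfilt2, if_pos, if_neg, Bool.false_eq_true,
        not_false_eq_true, List.foldl_cons]
      rw [List.append_assoc,
        insertBy_append_left bef x a0 (a1 ++ a2) (by
          intro y hy
          rcases List.mem_append.1 hy with hy' | hy'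
          · exact htrue x y (by rw [hx, h1 y hy']; norm_num)
          · exact htrue x y (by rw [hx, h2 y hy']; norm_num)),
        ← List.append_assoc]
      exact ih (PySem.List.insertBy bef x a0) a1 a2
        (fun y hy => by
          rcases (PySem.List.mem_insertBy _ _ _ _).1 hy with rfl | hy'
          · exact hx
          · exact h0 y hy') h1 h2
    · have hfilt0 : (G x == 0) = false := by simp [hx]
      have hfilt1 : (G x == 1) = true := by simp [hx]
      have hfilt2 : (G x == 2) = false := by simp [hx]
      simp only [List.filter_cons, hfilt0, hfilt1, hfilt2, List.foldl_cons, ite_true, ite_false,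
        Bool.false_eq_true]
      rw [insertBy_append_left bef x (a0 ++ a1) a2 (by
          intro y hy; exact htrue x y (by rw [hx, h2 y hy]; norm_num)),
        insertBy_append_right bef x a0 a1 (by
          intro y hy; exact hfalse x y (by rw [hx, h0 y hy]; norm_num)),
        List.append_assoc, ← List.append_assoc]
      exact ih a0 (PySem.List.insertBy bef x a1) a2 h0
        (fun y hy => by
          rcases (PySem.List.mem_insertBy _ _ _ _).1 hy with rfl | hy'
          · exact hx
          · exact h1 y hy') h2
    · have hfilt0 : (G x == 0) = false := by simp [hx]
      have hfilt1 : (G x == 1) = false := by simp [hx]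
      have hfilt2 : (G x == 2) = true := by simp [hx]
      simp only [List.filter_cons, hfilt0, hfilt1, hfilt2, List.foldl_cons, ite_true, ite_false,
        Bool.false_eq_true]
      rw [insertBy_append_right bef x (a0 ++ a1) a2 (by
          intro y hy
          rcases List.mem_append.1 hy with hy' | hy'
          · exact hfalse x y (by rw [hx, h0 y hy']; norm_num)
          · exact hfalse x y (by rw [hx, h1 y hy']; norm_num))]
      exact ih a0 a1 (PySem.List.insertBy bef x a2) h0 h1
        (fun y hy => by
          rcases (PySem.List.mem_insertBy _ _ _ _).1 hy with rfl | hy'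
          · exact hx
          · exact h2 y hy')

-- A's partition loop computes the three filters
theorem partition_eq (ks : List String) :
    ks.foldl
      (fun (acc : List String × List String × List String) d =>
        if PySem.Str.isIn "iPhone" d then (acc.1 ++ [d], acc.2.1, acc.2.2)
        else if PySem.Str.isIn "iPad" d then (acc.1, acc.2.1 ++ [d], acc.2.2)
        else (acc.1, acc.2.1, acc.2.2 ++ [d]))
      ([], [], [])
    = (ks.filter (fun x => pyGroup x == 0),
       ks.filter (fun x => pyGroup x == 1),
       ks.filter (fun x => pyGroup x == 2)) := by
  have gen : ∀ (ks : List String) (a b c : List String),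
      ks.foldl
        (fun (acc : List String × List String × List String) d =>
          if PySem.Str.isIn "iPhone" d then (acc.1 ++ [d], acc.2.1, acc.2.2)
          else if PySem.Str.isIn "iPad" d then (acc.1, acc.2.1 ++ [d], acc.2.2)
          else (acc.1, acc.2.1, acc.2.2 ++ [d]))
        (a, b, c)
      = (a ++ ks.filter (fun x => pyGroup x == 0),
         b ++ ks.filter (fun x => pyGroup x == 1),
         c ++ ks.filter (fun x => pyGroup x == 2)) := by
    intro ks
    induction ks with
    | nil => intro a b c; simp
    | cons k ks' ih =>
      intro a b c
      simp only [List.foldl_cons, List.filter_cons]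
      by_cases hph : PySem.Str.isIn "iPhone" k
      · have hg : pyGroup k = 0 := by unfold pyGroup; rw [if_pos hph]
        rw [if_pos hph, ih]
        simp [hg]
      · by_cases hpa : PySem.Str.isIn "iPad" k
        · have hg : pyGroup k = 1 := by unfold pyGroup; rw [if_neg hph, if_pos hpa]
          rw [if_neg hph, if_pos hpa, ih]
          simp [hg]
        · have hg : pyGroup k = 2 := by unfold pyGroup; rw [if_neg hph, if_neg hpa]
          rw [if_neg hph, if_neg hpa, ih]
          simp [hg]
  simpa using gen ks [] [] []

theorem pyGroup_cases (d : String) : pyGroup d = 0 ∨ pyGroup d = 1 ∨ pyGroup d = 2 := by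
  unfold pyGroup; split_ifs <;> simp

theorem pyKeyB_of_grp01 (d : String) (h : pyGroup d = 0 ∨ pyGroup d = 1) :
    pyKeyB d = (pyGroup d, pyModelNumB d, PySem.Str.lower d) := by
  unfold pyGroup at h ⊢
  unfold pyKeyB
  split_ifs at h ⊢ <;> first | rfl | omega

theorem pyKeyB_of_grp2 (d : String) (h : pyGroup d = 2) : pyKeyB d = (2, 0, d) := by
  unfold pyGroup at h
  unfold pyKeyB
  split_ifs at h ⊢ <;> first | rfl | omega

theorem befB_true_of_lt (x y : String) (h : pyGroup x < pyGroup y) :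
    pyLt3 (pyKeyB x) (pyKeyB y) = true := by
  unfold pyLt3
  rw [pyKeyB_fst, pyKeyB_fst]
  simp [h]

theorem befB_false_of_gt (x y : String) (h : pyGroup y < pyGroup x) :
    pyLt3 (pyKeyB x) (pyKeyB y) = false := by
  unfold pyLt3
  rw [pyKeyB_fst, pyKeyB_fst]
  have h1 : ¬ (pyGroup x < pyGroup y) := by omega
  have h2 : pyGroup x ≠ pyGroup y := by omega
  simp [h1, h2]

theorem befB_eq_grp01 (g : Int) (hg : g = 0 ∨ g = 1) (x y : String)
    (hx : pyGroup x = g) (hy : pyGroup y = g) :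
    pyLt3 (pyKeyB x) (pyKeyB y)
      = (decide (pyModelNumA x < pyModelNumA y)
         || (!decide (pyModelNumA y < pyModelNumA x)
             && decide (PySem.Str.lower x < PySem.Str.lower y))) := by
  rw [pyKeyB_of_grp01 x (by omega), pyKeyB_of_grp01 y (by omega), hx, hy]
  unfold pyLt3
  simp only [lt_self_iff_false, decide_false, BEq.rfl, Bool.true_and, Bool.false_or]
  rw [pyModelNumB_eq_A]
  exact lex_tail_eq _ _ _

theorem befB_eq_grp2 (x y : String) (hx : pyGroup x = 2) (hy : pyGroup y = 2) :
    pyLt3 (pyKeyB x) (pyKeyB y) = decide (x < y) := by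
  rw [pyKeyB_of_grp2 x hx, pyKeyB_of_grp2 y hy]
  unfold pyLt3
  simp

theorem sorted2_eq_foldl (xs : List String) (k1 : String → Int) (k2 : String → String) :
    PySem.List.sorted2 xs k1 k2
      = xs.foldl (fun acc x => PySem.List.insertBy
          (fun a b => decide (k1 a < k1 b) || (!decide (k1 b < k1 a) && decide (k2 a < k2 b)))
          x acc) [] := rfl

theorem sorted_id_eq_foldl (xs : List String) :
    PySem.List.sorted xs (fun d => d) false
      = xs.foldl (fun acc x => PySem.List.insertBy (fun a b => decide (a < b)) x acc) [] := rfl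

theorem grp_of_mem_filter (g : Int) (ks : List String) (x : String)
    (hx : x ∈ ks.filter (fun x => pyGroup x == g)) : pyGroup x = g := by
  have := (List.mem_filter.1 hx).2
  simpa using this

-- ===== VERDICT (by name: the statement is the Claim_ definition above) =====
set_option maxHeartbeats 1000000 in
theorem sort_iphone_models_spec : Claim_equal_sort_iphone_models := by
  intro dc _ _
  unfold Spec_sort_iphone_models sort_iphone_models sort_iphone_models_alt
  rw [partition_eq]
  show PySem.List.sorted2 ((PySem.Dict.ofList dc).keys.filter (fun x => pyGroup x == 0)) pyModelNumA PySem.Str.lower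
      ++ PySem.List.sorted2 ((PySem.Dict.ofList dc).keys.filter (fun x => pyGroup x == 1)) pyModelNumA PySem.Str.lower
      ++ PySem.List.sorted ((PySem.Dict.ofList dc).keys.filter (fun x => pyGroup x == 2)) (fun d => d) false
    = _
  set ks := (PySem.Dict.ofList dc).keys with hks
  have hsplit := stable_split3 (fun a b => pyLt3 (pyKeyB a) (pyKeyB b)) pyGroup
    pyGroup_cases
    (fun x y h => befB_true_of_lt x y h)
    (fun x y h => befB_false_of_gt x y h)
    ks [] [] [] (by simp) (by simp) (by simp)
  simp only [List.nil_append] at hsplit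
  rw [hsplit]
  congr 1
  · congr 1
    · rw [sorted2_eq_foldl]
      exact (foldl_insertBy_congr _ _ (fun x => pyGroup x = 0)
        (fun x y hx hy => befB_eq_grp01 0 (Or.inl rfl) x y hx hy)
        _ [] (fun x hx => grp_of_mem_filter 0 ks x hx) (by simp)).symm
    · rw [sorted2_eq_foldl]
      exact (foldl_insertBy_congr _ _ (fun x => pyGroup x = 1)
        (fun x y hx hy => befB_eq_grp01 1 (Or.inr rfl) x y hx hy)
        _ [] (fun x hx => grp_of_mem_filter 1 ks x hx) (by simp)).symm
  · rw [sorted_id_eq_foldl]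
    exact (foldl_insertBy_congr _ _ (fun x => pyGroup x = 2)
      (fun x y hx hy => befB_eq_grp2 x y hx hy)
      _ [] (fun x hx => grp_of_mem_filter 2 ks x hx) (by simp)).symm
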